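-- pv_equiv track=rewrite | github.com/Angerz/Semana_12 | main.py | longitud_de_faja
-- ===== SOURCE A (Python) =====
-- def longitud_de_faja(dato, tabla):
--     long_faja = None
--
--     if dato in tabla:  # Si el dato está presente en la tabla, se selecciona ese número
--         long_faja = dato
--     else:
--         mayores = [num for num in tabla if num > dato]
--         if mayores:  # Si hay números mayores
--             long_faja = min(mayores)  # Selecciona el número más cercano
--
--     return long_faja
-- ===== SOURCE B (Python) =====
-- def longitud_de_faja(dato, tabla):
--     best = None
--     for num in tabla:
--         if num == dato:
--             return dato
--         if num > dato and (best is None or num < best):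
--             best = num
--     return best
-- ===== Notes on version B (the rewrite author's own statement) =====
-- stated objective: simpler
-- what changed: Replaces A's membership scan plus filter-plus-min (three passes, with an intermediate list) by one single loop that returns dato on an exact hit and otherwise keeps a running minimum of the elements greater than dato.
import Mathlib
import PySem

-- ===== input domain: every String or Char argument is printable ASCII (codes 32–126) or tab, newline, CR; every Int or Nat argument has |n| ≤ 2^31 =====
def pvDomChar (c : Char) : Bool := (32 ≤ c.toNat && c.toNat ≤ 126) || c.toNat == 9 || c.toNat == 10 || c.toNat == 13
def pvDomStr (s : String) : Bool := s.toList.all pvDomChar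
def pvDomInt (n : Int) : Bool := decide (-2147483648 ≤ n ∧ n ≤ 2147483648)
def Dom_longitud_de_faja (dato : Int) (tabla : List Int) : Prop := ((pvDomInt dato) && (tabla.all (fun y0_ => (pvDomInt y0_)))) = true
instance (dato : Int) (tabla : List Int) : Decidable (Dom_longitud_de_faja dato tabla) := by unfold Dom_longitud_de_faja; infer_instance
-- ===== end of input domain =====

-- B is a single loop (early exact-match return, running minimum of the greater elements)
-- instead of A's membership scan plus filter plus min: simpler, one pass.

-- ===== PORT A =====
def longitud_de_faja (dato : Int) (tabla : List Int) : Option Int :=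
  if tabla.contains dato then
    some dato
  else
    let mayores := tabla.filter (fun num => num > dato)
    if mayores ≠ [] then
      PySem.List.min? mayores (fun x => x)
    else
      none

-- ===== PORT B =====
def longitud_de_faja_altLoop (dato : Int) (best : Option Int) : List Int → Option Int
  | [] => best
  | num :: rest =>
    if num = dato then some dato
    else if num > dato ∧ ∀ b ∈ best, num < b then
      longitud_de_faja_altLoop dato (some num) rest
    else
      longitud_de_faja_altLoop dato best rest

def longitud_de_faja_alt (dato : Int) (tabla : List Int) : Option Int :=
  longitud_de_faja_altLoop dato none tabla

-- ===== PRECONDITION & SPEC =====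
def Spec_longitud_de_faja (dato : Int) (tabla : List Int) (out : Option Int) : Prop := out = longitud_de_faja_alt dato tabla
instance (dato : Int) (tabla : List Int) (out : Option Int) : Decidable (Spec_longitud_de_faja dato tabla out) := by unfold Spec_longitud_de_faja; infer_instance

-- ===== CLAIM =====
def Claim_equal_longitud_de_faja : Prop := ∀ (dato : Int) (tabla : List Int), Dom_longitud_de_faja dato tabla → Spec_longitud_de_faja dato tabla (longitud_de_faja dato tabla)

-- ===== LEMMAS AND PROOFS =====

theorem altLoop_mem (dato : Int) (l : List Int) (h : dato ∈ l) :
    ∀ best, longitud_de_faja_altLoop dato best l = some dato := by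
  induction l with
  | nil => cases h
  | cons num rest ih =>
    intro best
    by_cases hnd : num = dato
    · simp [longitud_de_faja_altLoop, hnd]
    · have hmem : dato ∈ rest := by
        rcases List.mem_cons.mp h with h1 | h1
        · exact absurd h1.symm hnd
        · exact h1
      rw [longitud_de_faja_altLoop, if_neg hnd]
      split <;> exact ih hmem _

theorem altLoop_not_mem (dato : Int) (l : List Int) (h : dato ∉ l) :
    ∀ best, longitud_de_faja_altLoop dato best l =
      match l.filter (fun num => num > dato), best with
      | [], b => b
      | x :: t, none => some (List.foldl min x t)
      | x :: t, some b => some (List.foldl min b (x :: t)) := by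
  induction l with
  | nil => intro best; simp [longitud_de_faja_altLoop]
  | cons num rest ih =>
    intro best
    have hnd : num ≠ dato := fun e => h (e ▸ List.mem_cons_self)
    have hrest : dato ∉ rest := fun hm => h (List.mem_cons_of_mem _ hm)
    by_cases hgt : num > dato
    · have hfil : (num :: rest).filter (fun n => decide (n > dato)) =
        num :: rest.filter (fun n => decide (n > dato)) := by simp [List.filter, hgt]
      cases best with
      | none =>
        rw [longitud_de_faja_altLoop, if_neg hnd, if_pos ⟨hgt, by simp⟩]
        rw [ih hrest (some num), hfil]
        cases hf : rest.filter (fun n => decide (n > dato)) with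
        | nil => simp
        | cons x t => simp [List.foldl]
      | some b =>
        rw [longitud_de_faja_altLoop, if_neg hnd]
        by_cases hlt : num < b
        · rw [if_pos ⟨hgt, by simpa using hlt⟩, ih hrest (some num), hfil]
          cases hf : rest.filter (fun n => decide (n > dato)) with
          | nil => simp [min_eq_right hlt.le]
          | cons x t => simp [List.foldl, min_eq_right hlt.le]
        · rw [if_neg (by rintro ⟨-, hall⟩; exact hlt (by simpa using hall)),
            ih hrest (some b), hfil]
          cases hf : rest.filter (fun n => decide (n > dato)) with
          | nil => simp [min_eq_left (le_of_not_gt hlt)]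
          | cons x t => simp [List.foldl, min_eq_left (le_of_not_gt hlt)]
    · have hfil : (num :: rest).filter (fun n => decide (n > dato)) =
        rest.filter (fun n => decide (n > dato)) := by simp [List.filter, hgt]
      have hcond : ¬ (num > dato ∧ ∀ b ∈ best, num < b) := by
        intro hc; exact hgt hc.1
      rw [longitud_de_faja_altLoop, if_neg hnd, if_neg hcond]
      rw [ih hrest best, hfil]

-- ===== VERDICT =====
theorem longitud_de_faja_spec : Claim_equal_longitud_de_faja := by
  intro dato tabla _
  unfold Spec_longitud_de_faja longitud_de_faja longitud_de_faja_alt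
  by_cases hc : tabla.contains dato
  · rw [if_pos hc, altLoop_mem dato tabla (by simpa using hc)]
  · rw [if_neg hc, altLoop_not_mem dato tabla (by simpa using hc) none]
    cases hf : tabla.filter (fun num => num > dato) with
    | nil => simp
    | cons x t =>
      simp only [ne_eq, reduceCtorEq, not_false_iff, if_pos]
      rw [PySem.List.min?_id_cons]
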